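-- pv_equiv track=rewrite | github.com/sojaeheon/TIL | 100_algo_practice/1220_magnetic/sol.py | deadlock
-- ===== SOURCE A (Python) =====
-- def deadlock(arr,num):
--     deadlock_count = 0
--
--     for i in range(num):
--         check = False
--         for j in range(num):
--             if arr[j][i] == 1:
--                 check = True
--             elif check and arr[j][i] == 2:
--                 deadlock_count +=1
--                 check = False
--     return deadlock_count
-- ===== SOURCE B (Python) =====
-- def deadlock(arr, num):
--     total = 0
--     for i in range(num):
--         col = [arr[j][i] for j in range(num) if arr[j][i] in (1, 2)]
--         total += sum(1 for a, b in zip(col, col[1:]) if a == 1 and b == 2)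
--     return total
-- ===== Notes on version B (the rewrite author's own statement) =====
-- stated objective: alternative
-- what changed: Replaces A's flag-carrying state machine over each column with a filter-then-pairwise decomposition: keep only the 1/2 cells of the column and count adjacent (1,2) pairs.
import Mathlib
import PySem

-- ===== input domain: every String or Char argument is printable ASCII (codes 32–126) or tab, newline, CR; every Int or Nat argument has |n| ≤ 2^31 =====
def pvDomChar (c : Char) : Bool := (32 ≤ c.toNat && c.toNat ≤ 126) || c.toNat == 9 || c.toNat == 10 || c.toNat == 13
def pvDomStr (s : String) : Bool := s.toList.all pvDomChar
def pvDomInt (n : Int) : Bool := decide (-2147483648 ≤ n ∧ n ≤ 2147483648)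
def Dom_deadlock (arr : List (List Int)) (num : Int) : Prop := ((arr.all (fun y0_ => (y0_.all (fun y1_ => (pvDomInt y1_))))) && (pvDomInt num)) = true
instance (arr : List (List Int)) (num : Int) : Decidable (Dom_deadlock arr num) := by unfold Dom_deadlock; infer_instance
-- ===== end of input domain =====

-- B replaces A's flag-carrying column state machine by filtering each column to its 1/2 cells
-- and counting adjacent (1,2) pairs (alternative decomposition, same asymptotic cost).


-- ===== PORT A =====
-- arr[j][i] is ported with pyGetD (default 0 / []); exact under Pre_deadlock, which puts every index in range.
def deadlock (arr : List (List Int)) (num : Int) : Int :=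
  (PySem.List.pyRange 0 num 1).foldl (fun count i =>
    ((PySem.List.pyRange 0 num 1).foldl (fun (s : Bool × Int) j =>
      if PySem.List.pyGetD (PySem.List.pyGetD arr j []) i 0 = 1 then (true, s.2)
      else if s.1 ∧ PySem.List.pyGetD (PySem.List.pyGetD arr j []) i 0 = 2 then (false, s.2 + 1)
      else s) (false, count)).2) 0

-- ===== PORT B =====
def deadlock_alt (arr : List (List Int)) (num : Int) : Int :=
  (PySem.List.pyRange 0 num 1).foldl (fun total i =>
    let col := (PySem.List.pyRange 0 num 1).filterMap (fun j =>
      if PySem.List.pyGetD (PySem.List.pyGetD arr j []) i 0 = 1 ∨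
         PySem.List.pyGetD (PySem.List.pyGetD arr j []) i 0 = 2
      then some (PySem.List.pyGetD (PySem.List.pyGetD arr j []) i 0) else none)
    total + (col.zip (col.drop 1)).foldl
      (fun s ab => if ab.1 = 1 ∧ ab.2 = 2 then s + 1 else s) 0) 0

-- ===== PRECONDITION & SPEC =====
-- Pre_ excludes exactly the inputs where Python's arr[j][i] raises IndexError: fewer than num rows,
-- or one of the first num rows shorter than num.
def Pre_deadlock (arr : List (List Int)) (num : Int) : Prop :=
  num ≤ (arr.length : Int) ∧ ∀ row ∈ arr.take num.toNat, num ≤ (row.length : Int)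
instance (arr : List (List Int)) (num : Int) : Decidable (Pre_deadlock arr num) := by
  unfold Pre_deadlock; infer_instance
def pvWitness_deadlock : List (List Int) × Int := ([[1, 0], [2, 2]], 2)
def Spec_deadlock (arr : List (List Int)) (num : Int) (out : Int) : Prop := out = deadlock_alt arr num
instance (arr : List (List Int)) (num : Int) (out : Int) : Decidable (Spec_deadlock arr num out) := by unfold Spec_deadlock; infer_instance

-- ===== CLAIM (what is proved, stated in full; the proofs are below) =====
def Claim_equal_deadlock : Prop := ∀ (arr : List (List Int)) (num : Int), Dom_deadlock arr num → Pre_deadlock arr num → Spec_deadlock arr num (deadlock arr num)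

-- ===== LEMMAS AND PROOFS =====

-- adjacent (1,2) pairs of a list
def pvPairs : List Int → Int
  | a :: b :: t => (if a = 1 ∧ b = 2 then 1 else 0) + pvPairs (b :: t)
  | _ => 0

-- A's column state machine as a function of the column values
def pvMach : Bool → List Int → Int
  | _, [] => 0
  | c, x :: xs =>
    if x = 1 then pvMach true xs
    else if c ∧ x = 2 then 1 + pvMach false xs
    else pvMach c xs

lemma pvPairs_cons_ne (x : Int) (f : List Int) (hx : x ≠ 1) :
    pvPairs (x :: f) = pvPairs f := by
  cases f <;> simp [pvPairs, hx]

-- the state machine counts exactly the adjacent (1,2) pairs of the 1/2-filtered column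
lemma pvMach_eq_pvPairs (l : List Int) :
    ∀ c : Bool, pvMach c l =
      pvPairs ((if c then [1] else []) ++ l.filter (fun v => decide (v = 1 ∨ v = 2))) := by
  induction l with
  | nil => intro c; cases c <;> simp [pvMach, pvPairs]
  | cons x xs ih =>
    intro c
    by_cases h1 : x = 1
    · subst h1
      cases c <;> simp [pvMach, ih true, pvPairs]
    · by_cases h2 : x = 2
      · subst h2
        cases c <;>
          simp [pvMach, ih false, ih true, pvPairs, pvPairs_cons_ne 2 _ (by norm_num), h1]
      · cases c <;> simp [pvMach, ih true, ih false, h1, h2, List.filter_cons]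

-- A's inner fold over indices, written over an arbitrary index list and value function
lemma foldA_eq (vf : Int → Int) :
    ∀ (js : List Int) (c : Bool) (cnt : Int),
    (js.foldl (fun (s : Bool × Int) j =>
        if vf j = 1 then (true, s.2)
        else if s.1 ∧ vf j = 2 then (false, s.2 + 1)
        else s) (c, cnt)).2 = cnt + pvMach c (js.map vf) := by
  intro js
  induction js with
  | nil => intro c cnt; simp [pvMach]
  | cons j t ih =>
    intro c cnt
    by_cases h1 : vf j = 1
    · simp [h1, ih, pvMach]
    · by_cases h2 : vf j = 2
      · cases c <;> simp [h1, h2, ih, pvMach] <;> ring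
      · cases c <;> simp [h1, h2, ih, pvMach]

-- B's comprehension equals filtering the mapped column
lemma filterMap_eq (vf : Int → Int) :
    ∀ js : List Int,
    js.filterMap (fun j => if vf j = 1 ∨ vf j = 2 then some (vf j) else none) =
      (js.map vf).filter (fun v => decide (v = 1 ∨ v = 2)) := by
  intro js
  induction js with
  | nil => rfl
  | cons j t ih =>
    by_cases h : vf j = 1 ∨ vf j = 2 <;>
      simp [List.filterMap_cons, List.filter_cons, h, ih]

-- B's zip fold counts pvPairs
lemma foldB_eq : ∀ (l : List Int) (s : Int),
    ((l.zip (l.drop 1)).foldl (fun s ab => if ab.1 = 1 ∧ ab.2 = 2 then s + 1 else s) s)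
      = s + pvPairs l := by
  intro l
  induction l with
  | nil => intro s; simp [pvPairs]
  | cons a t ih =>
    intro s
    cases t with
    | nil => simp [pvPairs]
    | cons b u =>
      rw [show List.drop 1 (a :: b :: u) = b :: u from rfl, List.zip_cons_cons, List.foldl_cons,
          show ((b :: u) : List Int).zip u = (b :: u).zip (List.drop 1 (b :: u)) from rfl, ih]
      by_cases h : a = 1 ∧ b = 2
      · obtain ⟨ha, hb⟩ := h; subst ha; subst hb; simp [pvPairs]; ring
      · simp only [pvPairs]
        rw [if_neg (by simpa using h), if_neg h]
        ring

-- ===== VERDICT (by name: the statement is the Claim_ definition above) =====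
theorem deadlock_spec : Claim_equal_deadlock := by
  intro arr num _ _
  unfold Spec_deadlock deadlock deadlock_alt
  congr 1
  funext cnt i
  rw [show (fun (s : Bool × Int) j =>
        if PySem.List.pyGetD (PySem.List.pyGetD arr j []) i 0 = 1 then (true, s.2)
        else if s.1 ∧ PySem.List.pyGetD (PySem.List.pyGetD arr j []) i 0 = 2 then (false, s.2 + 1)
        else s) = (fun (s : Bool × Int) j =>
        if (fun j => PySem.List.pyGetD (PySem.List.pyGetD arr j []) i 0) j = 1 then (true, s.2)
        else if s.1 ∧ (fun j => PySem.List.pyGetD (PySem.List.pyGetD arr j []) i 0) j = 2 then (false, s.2 + 1)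
        else s) from rfl]
  rw [foldA_eq, pvMach_eq_pvPairs, filterMap_eq]
  simp only [foldB_eq]
  simp
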